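-- pv_equiv track=rewrite | github.com/aspaul20/leetcode | getLucky.py | getLucky
-- ===== SOURCE A (Python) =====
-- def getLucky(s: str, k: int) -> int:
--     alphabet = 'abcdefghijklmnopqrstuvwxyz'
--     mapping = {char: ord(char)-96 for char in alphabet}
--     num_str = "".join([str(mapping[char]) for char in s])
--
--     _sum = sum([int(num) for num in num_str])
--     for _ in range(k-1):
--         _sum = sum([int(num) for num in str(_sum)])
--     return _sum
-- ===== SOURCE B (Python) =====
-- def getLucky(s: str, k: int) -> int:
--     # First pass: each letter value v = ord(c)-96 is < 100, so its digit sum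
--     # is just v // 10 + v % 10 -- no digit extraction loop or string needed.
--     total = 0
--     for c in s:
--         v = ord(c) - 96
--         total += v // 10 + v % 10
--     # Further passes: stop as soon as total is a single digit, since the
--     # digit sum of a single-digit number is itself (fixpoint) -- so at most
--     # a handful of iterations run even for huge k.
--     while k > 1 and total > 9:
--         total = sum(map(int, str(total)))
--         k -= 1
--     return total
-- ===== Notes on version B (the rewrite author's own statement) =====
-- stated objective: faster
-- what changed: B drops the dict and the concatenated digit string: the first pass uses the closed form v//10+v%10 for the (always <100) letter values, and the k-1 reduction rounds become an early-terminating while loop that stops at the single-digit fixpoint, so at most a few rounds run even for huge k.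
import Mathlib
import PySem

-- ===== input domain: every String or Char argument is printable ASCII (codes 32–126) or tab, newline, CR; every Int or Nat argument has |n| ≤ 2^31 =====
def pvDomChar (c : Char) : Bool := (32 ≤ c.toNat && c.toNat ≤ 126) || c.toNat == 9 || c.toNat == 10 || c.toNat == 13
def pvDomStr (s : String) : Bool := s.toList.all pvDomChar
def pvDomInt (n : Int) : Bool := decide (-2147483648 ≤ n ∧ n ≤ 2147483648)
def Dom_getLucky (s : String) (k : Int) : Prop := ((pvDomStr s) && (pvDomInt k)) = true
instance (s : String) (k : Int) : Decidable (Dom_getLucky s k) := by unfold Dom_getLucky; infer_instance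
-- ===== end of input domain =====

-- B replaces A's dict + concatenated digit string with a closed-form first pass (v//10+v%10) and an early-terminating reduction loop that stops at the single-digit fixpoint, so the cost no longer grows with k.


-- ===== PORT A =====
-- alphabet = 'abcdefghijklmnopqrstuvwxyz'  (as the list of its characters)
def pvAlphabet : List Char :=
  ['a','b','c','d','e','f','g','h','i','j','k','l','m','n','o','p','q','r','s','t','u','v','w','x','y','z']
-- mapping = {char: ord(char)-96 for char in alphabet}
def pvMapping : PySem.Dict Char Int :=
  pvAlphabet.foldl (fun d c => d.insert c ((c.toNat : Int) - 96)) PySem.Dict.empty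
-- int(num) for a one-character string num; the default 0 is never reached under Pre_
def pvDigitVal (d : Char) : Int := (PySem.Int.ofChars? [d]).getD 0
-- num_str = "".join([str(mapping[char]) for char in s]) — per-character, so join = flatten;
-- mapping[char] is ported as getD 0, exact under Pre_ (the KeyError case is excluded by Pre_);
-- _sum = sum([int(num) for num in num_str]); then
-- for _ in range(k-1): _sum = sum([int(num) for num in str(_sum)])
def getLucky (s : String) (k : Int) : Int :=
  (PySem.List.pyRange 0 (k - 1) 1).foldl
    (fun acc _ => ((PySem.Int.toChars acc).map pvDigitVal).sum)
    (((s.toList.map (fun c => PySem.Int.toChars (pvMapping.getD c 0))).flatten.map pvDigitVal).sum)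

-- ===== PORT B =====
-- int(num) for a one-character string num (B's sum(map(int, str(total))))
def pvIntChar (d : Char) : Int := (PySem.Int.ofChars? [d]).getD 0
-- while k > 1 and total > 9: total = sum(map(int, str(total))); k -= 1
-- the countdown on k is the Nat (k-1).toNat, so the loop is structural recursion
def pvLoopB : Nat → Int → Int
  | 0, t => t
  | n + 1, t => if t > 9 then pvLoopB n (((PySem.Int.toChars t).map pvIntChar).sum) else t
-- total = 0; for c in s: v = ord(c) - 96; total += v // 10 + v % 10
def getLucky_alt (s : String) (k : Int) : Int :=
  pvLoopB (k - 1).toNat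
    (s.toList.foldl
      (fun total c =>
        total + (PySem.Int.floordiv ((c.toNat : Int) - 96) 10
                  + PySem.Int.mod ((c.toNat : Int) - 96) 10)) 0)

-- ===== PRECONDITION & SPEC =====
-- Pre_ excludes exactly the strings with a character outside 'a'..'z', on which A raises KeyError.
def Pre_getLucky (s : String) (k : Int) : Prop := s.toList.all (fun c => pvAlphabet.contains c) = true
instance (s : String) (k : Int) : Decidable (Pre_getLucky s k) := by unfold Pre_getLucky; infer_instance
def pvWitness_getLucky : String × Int := ("zoo", 2)
def Spec_getLucky (s : String) (k : Int) (out : Int) : Prop := out = getLucky_alt s k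
instance (s : String) (k : Int) (out : Int) : Decidable (Spec_getLucky s k out) := by unfold Spec_getLucky; infer_instance

-- ===== CLAIM (what is proved, stated in full; the proofs are below) =====
def Claim_equal_getLucky : Prop := ∀ (s : String) (k : Int), Dom_getLucky s k → Pre_getLucky s k → Spec_getLucky s k (getLucky s k)

-- ===== LEMMAS AND PROOFS =====

-- A's reduction step, named for the proofs
def pvStepA (t : Int) : Int := ((PySem.Int.toChars t).map pvDigitVal).sum

-- proof-side digit sum on Nat (fuel recursion; fuel n suffices since n/10 < n)
def pvDigsumAux : Nat → Nat → Nat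
  | 0, _ => 0
  | f + 1, n => if n = 0 then 0 else n % 10 + pvDigsumAux f (n / 10)
def pvDigsum (n : Nat) : Nat := pvDigsumAux n n

lemma pvDigsumAux_fuel (f f' n : Nat) (h : n ≤ f) (h' : n ≤ f') :
    pvDigsumAux f n = pvDigsumAux f' n := by
  induction f generalizing f' n with
  | zero =>
    interval_cases n
    cases f' <;> simp [pvDigsumAux]
  | succ f ih =>
    by_cases h0 : n = 0
    · subst h0; cases f' <;> simp [pvDigsumAux]
    · obtain ⟨g, rfl⟩ : ∃ g, f' = g + 1 := ⟨f' - 1, by omega⟩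
      simp only [pvDigsumAux, if_neg h0]
      rw [ih g (n / 10) (by omega) (by omega)]

lemma pvDigsum_eq (n : Nat) : pvDigsum n = if n = 0 then 0 else n % 10 + pvDigsum (n / 10) := by
  by_cases h0 : n = 0
  · subst h0; simp [pvDigsum, pvDigsumAux]
  · obtain ⟨m, rfl⟩ : ∃ m, n = m + 1 := ⟨n - 1, by omega⟩
    simp only [pvDigsum, pvDigsumAux, if_neg h0]
    congr 1
    exact pvDigsumAux_fuel m ((m + 1) / 10) ((m + 1) / 10)
      (Nat.lt_succ_iff.mp (Nat.div_lt_self (Nat.succ_pos m) (by omega))) (le_refl _)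

lemma pvDigitVal_digitChar (r : Nat) (h : r < 10) : pvDigitVal (Nat.digitChar r) = (r : Int) := by
  interval_cases r <;> decide

lemma pvDigsum_toDigits (n : Nat) :
    ((Nat.toDigits 10 n).map pvDigitVal).sum = (pvDigsum n : Int) := by
  induction n using Nat.strong_induction_on with
  | _ n ih =>
    by_cases h10 : n < 10
    · rw [Nat.toDigits_of_lt_base h10]
      rcases Nat.eq_zero_or_pos n with h0 | h0
      · subst h0; decide
      · simp only [List.map_cons, List.map_nil, List.sum_cons, List.sum_nil,
          pvDigitVal_digitChar n h10]
        rw [pvDigsum_eq, if_neg (by omega), pvDigsum_eq, if_pos (by omega)]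
        omega
    · rw [Nat.toDigits_of_base_le (by omega) (by omega), List.map_append, List.sum_append,
        ih (n / 10) (Nat.div_lt_self (by omega) (by omega))]
      rw [pvDigsum_eq n, if_neg (by omega)]
      simp only [List.map_cons, List.map_nil, List.sum_cons, List.sum_nil,
        pvDigitVal_digitChar (n % 10) (Nat.mod_lt _ (by omega))]
      push_cast
      ring

-- A's step on a nonnegative value is the Nat digit sum
lemma pvStepA_eq (a : Int) (ha : 0 ≤ a) : pvStepA a = (pvDigsum a.toNat : Int) := by
  unfold pvStepA PySem.Int.toChars
  rw [if_neg (by omega)]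
  exact pvDigsum_toDigits a.toNat

lemma pvStepA_nonneg (a : Int) (ha : 0 ≤ a) : 0 ≤ pvStepA a := by
  rw [pvStepA_eq a ha]; exact Int.natCast_nonneg _

-- the single-digit fixpoint
lemma pvStepA_fix (a : Int) (h0 : 0 ≤ a) (h9 : a ≤ 9) : pvStepA a = a := by
  rw [pvStepA_eq a h0, pvDigsum_eq, Nat.div_eq_of_lt (by omega : a.toNat < 10)]
  simp only [show pvDigsum 0 = 0 from rfl]
  split_ifs <;> omega

-- B's step is A's step (identical parsing of str(total))
lemma pvStepB_eq (t : Int) : ((PySem.Int.toChars t).map pvIntChar).sum = pvStepA t := by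
  rfl

-- a fold that ignores the list elements is iteration, and equals B's early-exit loop
lemma pvFold_loop (l : List Int) (t : Int) (ht : 0 ≤ t) :
    l.foldl (fun acc _ => pvStepA acc) t = pvLoopB l.length t := by
  induction l generalizing t with
  | nil => rfl
  | cons x xs ih =>
    simp only [List.foldl_cons, List.length_cons, pvLoopB, pvStepB_eq]
    by_cases h : t > 9
    · rw [if_pos h]; exact ih (pvStepA t) (pvStepA_nonneg t ht)
    · rw [if_neg h, pvStepA_fix t ht (by omega)]
      -- below the fixpoint the fold stays put
      clear ih
      induction xs with
      | nil => rfl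
      | cons y ys ih2 =>
        simp only [List.foldl_cons, pvStepA_fix t ht (by omega)]
        exact ih2
    
-- per letter: A's digit sum of str(mapping[c]) equals v//10 + v%10
lemma pvPerChar (c : Char) (hc : c ∈ pvAlphabet) :
    ((PySem.Int.toChars (pvMapping.getD c 0)).map pvDigitVal).sum
      = PySem.Int.floordiv ((c.toNat : Int) - 96) 10 + PySem.Int.mod ((c.toNat : Int) - 96) 10 := by
  fin_cases hc <;> decide

-- B's accumulating loop is an offset plus the sum of its per-letter terms
lemma pvFoldB_eq (l : List Char) (a : Int) :
    l.foldl
      (fun total c =>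
        total + (PySem.Int.floordiv ((c.toNat : Int) - 96) 10
                  + PySem.Int.mod ((c.toNat : Int) - 96) 10)) a
      = a + (l.map (fun c => PySem.Int.floordiv ((c.toNat : Int) - 96) 10
                  + PySem.Int.mod ((c.toNat : Int) - 96) 10)).sum := by
  induction l generalizing a with
  | nil => simp
  | cons c cs ih =>
    simp only [List.foldl_cons, List.map_cons, List.sum_cons, ih]
    ring

lemma pvInit_eq (l : List Char) (h : ∀ c ∈ l, c ∈ pvAlphabet) :
    ((l.map (fun c => PySem.Int.toChars (pvMapping.getD c 0))).flatten.map pvDigitVal).sum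
      = (l.map (fun c => PySem.Int.floordiv ((c.toNat : Int) - 96) 10
                  + PySem.Int.mod ((c.toNat : Int) - 96) 10)).sum := by
  induction l with
  | nil => rfl
  | cons c cs ih =>
    simp only [List.map_cons, List.flatten_cons, List.map_append, List.sum_append, List.sum_cons]
    rw [pvPerChar c (h c List.mem_cons_self), ih (fun x hx => h x (List.mem_cons_of_mem c hx))]

lemma pvInit_nonneg (l : List Char) (h : ∀ c ∈ l, c ∈ pvAlphabet) :
    0 ≤ (l.map (fun c => PySem.Int.floordiv ((c.toNat : Int) - 96) 10
                  + PySem.Int.mod ((c.toNat : Int) - 96) 10)).sum := by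
  apply List.sum_nonneg
  intro x hx
  simp only [List.mem_map] at hx
  obtain ⟨c, hc, rfl⟩ := hx
  have hc := h c hc
  fin_cases hc <;> decide

-- ===== VERDICT (by name: the statement is the Claim_ definition above) =====
theorem getLucky_spec : Claim_equal_getLucky := by
  intro s k _ hpre
  unfold Pre_getLucky at hpre
  simp only [List.all_eq_true, List.contains_iff_mem] at hpre
  unfold Spec_getLucky getLucky getLucky_alt
  rw [pvFoldB_eq, zero_add, pvInit_eq s.toList hpre]
  have := pvFold_loop (PySem.List.pyRange 0 (k - 1) 1) _ (pvInit_nonneg s.toList hpre)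
  rw [show (fun acc (_ : Int) => ((PySem.Int.toChars acc).map pvDigitVal).sum)
        = (fun acc _ => pvStepA acc) from rfl, this, PySem.List.length_pyRange_one]
  norm_num
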